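-- pv_equiv track=rewrite | github.com/opengauss-mirror/openGauss-server | src/gausskernel/dbmind/dbmind/common/types/sequence.py | _align_timestamps
-- ===== SOURCE A (Python) =====
-- def _align_timestamps(raw: tuple, step: int):
--     if len(raw) == 0:
--         return raw
--
--     diff = [0 for _ in range(len(raw))]
--     diff[0] = raw[0]
--     for i in range(1, len(raw)):
--         diff[i] = raw[i] - raw[i - 1]
--
--     for i in range(1, len(diff)):
--         if diff[i] % step > 0:
--             if diff[i] // step == 0:
--                 diff[i] = step
--             else:
--                 diff[i] -= (diff[i] % step)
--     rv = list(raw)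
--     for i in range(1, len(diff)):
--         rv[i] = rv[i - 1] + diff[i]
--     return tuple(rv)
-- ===== SOURCE B (Python) =====
-- def _align_timestamps(raw: tuple, step: int):
--     if len(raw) == 0:
--         return raw
--     prev = raw[0]
--     rv = [prev]
--     for x in raw[1:]:
--         d = x - prev
--         if d % step > 0:
--             d = step if d // step == 0 else d - d % step
--         rv.append(rv[-1] + d)
--         prev = x
--     return tuple(rv)
-- ===== Notes on version B (the rewrite author's own statement) =====
-- stated objective: simpler
-- what changed: Replaces the three index-based passes over an intermediate diff array (build diffs, round them in place, re-accumulate) by one single pass over raw[1:] that carries the previous raw value and the last aligned value, so no diff array exists at all.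
import Mathlib
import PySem

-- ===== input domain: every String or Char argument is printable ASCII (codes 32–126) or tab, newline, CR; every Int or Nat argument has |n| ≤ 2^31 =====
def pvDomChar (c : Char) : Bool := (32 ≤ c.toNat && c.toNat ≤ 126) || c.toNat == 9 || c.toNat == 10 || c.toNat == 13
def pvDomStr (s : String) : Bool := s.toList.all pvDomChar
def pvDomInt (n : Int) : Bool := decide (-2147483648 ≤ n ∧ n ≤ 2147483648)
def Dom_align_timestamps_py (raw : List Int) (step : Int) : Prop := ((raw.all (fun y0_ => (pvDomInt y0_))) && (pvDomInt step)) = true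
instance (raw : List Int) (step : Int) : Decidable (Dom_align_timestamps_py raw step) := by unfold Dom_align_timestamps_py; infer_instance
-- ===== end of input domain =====

set_option maxHeartbeats 1000000


-- B replaces A's three index passes over an intermediate diff array by one pass that
-- carries the previous raw value and the last aligned value (objective: simpler; same O(n)).

-- ===== PORT A =====
-- A-side helpers: one definition per loop of _align_timestamps, transliterated in order.
-- diff = [0 for _ in range(len(raw))]; diff[0] = raw[0]
def pvDiffInit (raw : List Int) : List Int :=
  PySem.List.pySetD ((PySem.List.pyRange 0 (raw.length : Int)).map (fun _ => (0 : Int))) 0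
    (PySem.List.pyGetD raw 0 0)

-- for i in range(1, len(raw)): diff[i] = raw[i] - raw[i - 1]
def pvPass1 (raw diff : List Int) : List Int :=
  (PySem.List.pyRange 1 (raw.length : Int)).foldl
    (fun l i => PySem.List.pySetD l i
      (PySem.List.pyGetD raw i 0 - PySem.List.pyGetD raw (i - 1) 0)) diff

-- for i in range(1, len(diff)): round diff[i] in place
def pvPass2 (step : Int) (diff : List Int) : List Int :=
  (PySem.List.pyRange 1 (diff.length : Int)).foldl
    (fun l i =>
      if PySem.Int.mod (PySem.List.pyGetD l i 0) step > 0 then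
        if PySem.Int.floordiv (PySem.List.pyGetD l i 0) step = 0 then
          PySem.List.pySetD l i step
        else
          PySem.List.pySetD l i
            (PySem.List.pyGetD l i 0 - PySem.Int.mod (PySem.List.pyGetD l i 0) step)
      else l) diff

-- rv = list(raw); for i in range(1, len(diff)): rv[i] = rv[i - 1] + diff[i]
def pvPass3 (diff rv : List Int) : List Int :=
  (PySem.List.pyRange 1 (diff.length : Int)).foldl
    (fun l i => PySem.List.pySetD l i
      (PySem.List.pyGetD l (i - 1) 0 + PySem.List.pyGetD diff i 0)) rv

def align_timestamps_py (raw : List Int) (step : Int) : List Int :=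
  if raw.length = 0 then raw
  else pvPass3 (pvPass2 step (pvPass1 raw (pvDiffInit raw))) raw

-- ===== PORT B =====
-- the single loop of Source B: prev = previous raw value, acc = last aligned value rv[-1]
def alignGo (step prev acc : Int) : List Int → List Int
  | [] => []
  | x :: xs =>
    let d := x - prev
    let d := if PySem.Int.mod d step > 0 then
               (if PySem.Int.floordiv d step = 0 then step
                else d - PySem.Int.mod d step)
             else d
    (acc + d) :: alignGo step x (acc + d) xs

def align_timestamps_py_alt (raw : List Int) (step : Int) : List Int :=
  match raw with
  | [] => []
  | a :: xs => a :: alignGo step a a xs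

-- ===== PRECONDITION & SPEC =====
-- Pre_ excludes only step = 0 together with at least two timestamps: there Python's
-- 'diff[i] % step' raises ZeroDivisionError (in A and in B alike).
def Pre_align_timestamps_py (raw : List Int) (step : Int) : Prop := 2 ≤ raw.length → step ≠ 0
instance (raw : List Int) (step : Int) : Decidable (Pre_align_timestamps_py raw step) := by unfold Pre_align_timestamps_py; infer_instance
def pvWitness_align_timestamps_py : List Int × Int := ([5, 7, 12, 13], 5)
def Spec_align_timestamps_py (raw : List Int) (step : Int) (out : List Int) : Prop := out = align_timestamps_py_alt raw step
instance (raw : List Int) (step : Int) (out : List Int) : Decidable (Spec_align_timestamps_py raw step out) := by unfold Spec_align_timestamps_py; infer_instance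

-- ===== CLAIM (what is proved, stated in full; the proofs are below) =====
def Claim_equal_align_timestamps_py : Prop := ∀ (raw : List Int) (step : Int), Dom_align_timestamps_py raw step → Pre_align_timestamps_py raw step → Spec_align_timestamps_py raw step (align_timestamps_py raw step)

-- ===== LEMMAS AND PROOFS =====

-- the rounding both programs apply to a consecutive difference d
def pvRound (step d : Int) : Int :=
  if PySem.Int.mod d step > 0 then
    (if PySem.Int.floordiv d step = 0 then step else d - PySem.Int.mod d step)
  else d

theorem alignGo_cons (step p r x : Int) (xs : List Int) :
    alignGo step p r (x :: xs) =
      (r + pvRound step (x - p)) :: alignGo step x (r + pvRound step (x - p)) xs := rfl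

theorem length_alignGo (step : Int) : ∀ (xs : List Int) (p r : Int),
    (alignGo step p r xs).length = xs.length := by
  intro xs
  induction xs with
  | nil => intro p r; rfl
  | cons x xs ih => intro p r; rw [alignGo_cons]; simp [ih]

-- the value recurrence of B's loop
theorem alignGo_getD (step : Int) : ∀ (xs : List Int) (p r : Int) (j : Nat), j < xs.length →
    (alignGo step p r xs).getD j 0 =
      (r :: alignGo step p r xs).getD j 0 +
        pvRound step (xs.getD j 0 - (p :: xs).getD j 0) := by
  intro xs
  induction xs with
  | nil => intro p r j h; simp at h
  | cons x xs ih =>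
    intro p r j h
    match j with
    | 0 => rw [alignGo_cons]; simp
    | Nat.succ j =>
      rw [alignGo_cons]
      simp only [List.getD_cons_succ]
      exact ih x (r + pvRound step (x - p)) j (by simpa using h)

-- an update loop whose body sets index i to a value depending only on i and the current l[i]
theorem setloop_indep (g : Int → Int → Int) (f : List Int → Int → List Int)
    (hf : ∀ (l : List Int) (m : Nat), m < l.length →
      f l (m : Int) = PySem.List.pySetD l (m : Int) (g (m : Int) (PySem.List.pyGetD l (m : Int) 0))) :
    ∀ (k a : Nat) (l0 : List Int), l0.length = a + k →
      ((PySem.List.pyRange (a : Int) (l0.length : Int)).foldl f l0).length = l0.length ∧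
      ∀ j : Nat, j < l0.length →
        ((PySem.List.pyRange (a : Int) (l0.length : Int)).foldl f l0).getD j 0 =
          if a ≤ j then g (j : Int) (l0.getD j 0) else l0.getD j 0 := by
  intro k
  induction k with
  | zero =>
    intro a l0 hlen
    rw [PySem.List.pyRange_one_eq_nil (by omega)]
    simp only [List.foldl_nil]
    refine ⟨by simp, ?_⟩
    intro j hj
    rw [if_neg (by omega)]
  | succ k ih =>
    intro a l0 hlen
    rw [PySem.List.pyRange_one_cons (by omega : (a : Int) < (l0.length : Int))]
    simp only [List.foldl_cons]
    rw [hf l0 a (by omega)]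
    have hl1 : (PySem.List.pySetD l0 (a : Int) (g (a : Int) (PySem.List.pyGetD l0 (a : Int) 0))).length = l0.length := by
      rw [PySem.List.pySetD_natCast]; simp
    have hcast : ((a : Int) + 1) = ((a + 1 : Nat) : Int) := by omega
    rw [hcast]
    obtain ⟨L, H⟩ := ih (a + 1)
      (PySem.List.pySetD l0 (a : Int) (g (a : Int) (PySem.List.pyGetD l0 (a : Int) 0)))
      (by rw [hl1]; omega)
    rw [show ((PySem.List.pySetD l0 (a : Int) (g (a : Int) (PySem.List.pyGetD l0 (a : Int) 0))).length : Int)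
          = (l0.length : Int) from by rw [hl1]] at L H
    refine ⟨by rw [L, hl1], ?_⟩
    intro j hj
    rw [H j (by rw [hl1]; exact hj)]
    have hval : (PySem.List.pySetD l0 (a : Int) (g (a : Int) (PySem.List.pyGetD l0 (a : Int) 0))).getD j 0
        = if j = a then g (a : Int) (l0.getD a 0) else l0.getD j 0 := by
      have h2 := PySem.List.pyGetD_pySetD_natCast l0 a j (g (a : Int) (PySem.List.pyGetD l0 (a : Int) 0)) 0 (by omega)
      simp only [PySem.List.pyGetD_natCast] at h2
      simpa [PySem.List.pyGetD_natCast] using h2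
    rw [hval]
    split_ifs <;> first | rfl | omega | (subst_vars; rfl)

-- the accumulation loop: rv[i] = rv[i-1] + dvals[i]
theorem setloop_seq (dvals : List Int) :
    ∀ (k a : Nat) (l0 : List Int), 1 ≤ a → l0.length = a + k →
      ((PySem.List.pyRange (a : Int) (l0.length : Int)).foldl
        (fun l i => PySem.List.pySetD l i
          (PySem.List.pyGetD l (i - 1) 0 + PySem.List.pyGetD dvals i 0)) l0).length = l0.length ∧
      (∀ j : Nat, j < a →
        ((PySem.List.pyRange (a : Int) (l0.length : Int)).foldl
          (fun l i => PySem.List.pySetD l i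
            (PySem.List.pyGetD l (i - 1) 0 + PySem.List.pyGetD dvals i 0)) l0).getD j 0 = l0.getD j 0) ∧
      (∀ j : Nat, a ≤ j → j < l0.length →
        ((PySem.List.pyRange (a : Int) (l0.length : Int)).foldl
          (fun l i => PySem.List.pySetD l i
            (PySem.List.pyGetD l (i - 1) 0 + PySem.List.pyGetD dvals i 0)) l0).getD j 0 =
        ((PySem.List.pyRange (a : Int) (l0.length : Int)).foldl
          (fun l i => PySem.List.pySetD l i
            (PySem.List.pyGetD l (i - 1) 0 + PySem.List.pyGetD dvals i 0)) l0).getD (j - 1) 0 +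
          dvals.getD j 0) := by
  intro k
  induction k with
  | zero =>
    intro a l0 ha hlen
    rw [PySem.List.pyRange_one_eq_nil (by omega)]
    simp only [List.foldl_nil]
    exact ⟨by simp, fun j hj => by simp, fun j hja hjl => by omega⟩
  | succ k ih =>
    intro a l0 ha hlen
    rw [PySem.List.pyRange_one_cons (by omega : (a : Int) < (l0.length : Int))]
    simp only [List.foldl_cons]
    have hia : ((a : Int) - 1) = ((a - 1 : Nat) : Int) := by omega
    have hbody : PySem.List.pySetD l0 (a : Int)
        (PySem.List.pyGetD l0 ((a : Int) - 1) 0 + PySem.List.pyGetD dvals (a : Int) 0)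
        = PySem.List.pySetD l0 (a : Int) (l0.getD (a - 1) 0 + dvals.getD a 0) := by
      rw [hia, PySem.List.pyGetD_natCast, PySem.List.pyGetD_natCast]
    rw [hbody]
    have hl1 : (PySem.List.pySetD l0 (a : Int) (l0.getD (a - 1) 0 + dvals.getD a 0)).length = l0.length := by
      rw [PySem.List.pySetD_natCast]; simp
    have hcast : ((a : Int) + 1) = ((a + 1 : Nat) : Int) := by omega
    rw [hcast]
    obtain ⟨L, H1, H2⟩ := ih (a + 1)
      (PySem.List.pySetD l0 (a : Int) (l0.getD (a - 1) 0 + dvals.getD a 0))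
      (by omega) (by rw [hl1]; omega)
    rw [show ((PySem.List.pySetD l0 (a : Int) (l0.getD (a - 1) 0 + dvals.getD a 0)).length : Int)
          = (l0.length : Int) from by rw [hl1]] at L H1 H2
    have hval : ∀ m : Nat, m < l0.length →
        (PySem.List.pySetD l0 (a : Int) (l0.getD (a - 1) 0 + dvals.getD a 0)).getD m 0
          = if m = a then l0.getD (a - 1) 0 + dvals.getD a 0 else l0.getD m 0 := by
      intro m hm
      have h2 := PySem.List.pyGetD_pySetD_natCast l0 a m (l0.getD (a - 1) 0 + dvals.getD a 0) 0 (by omega)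
      simpa [PySem.List.pyGetD_natCast] using h2
    refine ⟨by rw [L, hl1], ?_, ?_⟩
    · intro j hj
      rw [H1 j (by omega), hval j (by omega), if_neg (by omega)]
    · intro j hja hjl
      by_cases hje : j = a
      · subst hje
        rw [H1 j (by omega), hval j hjl, if_pos rfl,
            H1 (j - 1) (by omega), hval (j - 1) (by omega), if_neg (by omega)]
      · rw [H2 j (by omega) (by rw [hl1]; exact hjl)]

-- characterization of pvDiffInit
theorem diffInit_spec (raw : List Int) :
    (pvDiffInit raw).length = raw.length := by
  unfold pvDiffInit
  rw [PySem.List.pySetD_of_nonneg _ _ (by omega)]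
  simp [PySem.List.length_pyRange_one]

-- characterization of A's result on a nonempty list
theorem A_char (step a : Int) (xs : List Int) :
    (align_timestamps_py (a :: xs) step).length = xs.length + 1 ∧
    (align_timestamps_py (a :: xs) step).getD 0 0 = a ∧
    ∀ j : Nat, 1 ≤ j → j < xs.length + 1 →
      (align_timestamps_py (a :: xs) step).getD j 0 =
        (align_timestamps_py (a :: xs) step).getD (j - 1) 0 +
          pvRound step ((a :: xs).getD j 0 - (a :: xs).getD (j - 1) 0) := by
  have hraw : (a :: xs).length = xs.length + 1 := by simp
  -- stage 1: diff after the first loop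
  have hd1len : (pvDiffInit (a :: xs)).length = (a :: xs).length := diffInit_spec _
  have hp1 := setloop_indep
    (fun i _ => PySem.List.pyGetD (a :: xs) i 0 - PySem.List.pyGetD (a :: xs) (i - 1) 0)
    (fun l i => PySem.List.pySetD l i
      (PySem.List.pyGetD (a :: xs) i 0 - PySem.List.pyGetD (a :: xs) (i - 1) 0))
    (fun l m _ => rfl) xs.length 1 (pvDiffInit (a :: xs)) (by rw [hd1len]; simp only [List.length_cons]; omega)
  rw [show ((pvDiffInit (a :: xs)).length : Int) = ((a :: xs).length : Int) from by rw [hd1len]] at hp1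
  simp only [Nat.cast_one] at hp1
  obtain ⟨hd2len', hd2val'⟩ := hp1
  have hd2len : (pvPass1 (a :: xs) (pvDiffInit (a :: xs))).length = (a :: xs).length := by
    unfold pvPass1; rw [hd2len', hd1len]
  have hd2val : ∀ j : Nat, 1 ≤ j → j < (a :: xs).length →
      (pvPass1 (a :: xs) (pvDiffInit (a :: xs))).getD j 0 =
        (a :: xs).getD j 0 - (a :: xs).getD (j - 1) 0 := by
    intro j h1 hj
    have := hd2val' j (by omega)
    rw [if_pos h1] at this
    unfold pvPass1
    rw [this, PySem.List.pyGetD_natCast,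
        show ((j : Int) - 1) = ((j - 1 : Nat) : Int) from by omega, PySem.List.pyGetD_natCast]
  -- stage 2: rounding pass
  have hp2 := setloop_indep
    (fun _ v => pvRound step v)
    (fun l i =>
      if PySem.Int.mod (PySem.List.pyGetD l i 0) step > 0 then
        if PySem.Int.floordiv (PySem.List.pyGetD l i 0) step = 0 then
          PySem.List.pySetD l i step
        else
          PySem.List.pySetD l i
            (PySem.List.pyGetD l i 0 - PySem.Int.mod (PySem.List.pyGetD l i 0) step)
      else l)
    (by
      intro l m hm
      simp only [pvRound]
      split_ifs with h1 h2 <;> try rfl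
      rw [PySem.List.pySetD_natCast, PySem.List.pyGetD_natCast,
          List.getD_eq_getElem _ _ hm, List.set_getElem_self])
    xs.length 1 (pvPass1 (a :: xs) (pvDiffInit (a :: xs))) (by rw [hd2len]; simp only [List.length_cons]; omega)
  simp only [Nat.cast_one] at hp2
  obtain ⟨hd3len', hd3val'⟩ := hp2
  have hd3len : (pvPass2 step (pvPass1 (a :: xs) (pvDiffInit (a :: xs)))).length = (a :: xs).length := by
    unfold pvPass2; rw [hd3len', hd2len]
  have hd3val : ∀ j : Nat, 1 ≤ j → j < (a :: xs).length →
      (pvPass2 step (pvPass1 (a :: xs) (pvDiffInit (a :: xs)))).getD j 0 =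
        pvRound step ((a :: xs).getD j 0 - (a :: xs).getD (j - 1) 0) := by
    intro j h1 hj
    have := hd3val' j (by omega)
    rw [if_pos h1] at this
    unfold pvPass2
    rw [this, hd2val j h1 hj]
  -- stage 3: accumulation pass
  have hp3 := setloop_seq (pvPass2 step (pvPass1 (a :: xs) (pvDiffInit (a :: xs))))
    xs.length 1 (a :: xs) (by omega) (by simp only [List.length_cons]; omega)
  simp only [Nat.cast_one] at hp3
  obtain ⟨hrlen', hr0', hrval'⟩ := hp3
  have hunf : align_timestamps_py (a :: xs) step =
      (PySem.List.pyRange 1 ((a :: xs).length : Int)).foldl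
        (fun l i => PySem.List.pySetD l i
          (PySem.List.pyGetD l (i - 1) 0 +
            PySem.List.pyGetD (pvPass2 step (pvPass1 (a :: xs) (pvDiffInit (a :: xs)))) i 0)) (a :: xs) := by
    unfold align_timestamps_py
    rw [if_neg (by simp)]
    unfold pvPass3
    rw [hd3len]
  refine ⟨?_, ?_, ?_⟩
  · rw [hunf, hrlen', hraw]
  · rw [hunf, hr0' 0 (by omega)]; rfl
  · intro j h1 hj
    rw [hunf, hrval' j h1 (by omega), hd3val j h1 (by omega)]

-- characterization of B's result on a nonempty list
theorem B_char (step a : Int) (xs : List Int) :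
    (align_timestamps_py_alt (a :: xs) step).length = xs.length + 1 ∧
    (align_timestamps_py_alt (a :: xs) step).getD 0 0 = a ∧
    ∀ j : Nat, 1 ≤ j → j < xs.length + 1 →
      (align_timestamps_py_alt (a :: xs) step).getD j 0 =
        (align_timestamps_py_alt (a :: xs) step).getD (j - 1) 0 +
          pvRound step ((a :: xs).getD j 0 - (a :: xs).getD (j - 1) 0) := by
  have hB : align_timestamps_py_alt (a :: xs) step = a :: alignGo step a a xs := rfl
  refine ⟨by rw [hB]; simp [length_alignGo], by rw [hB]; rfl, ?_⟩
  intro j h1 hj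
  obtain ⟨m, rfl⟩ : ∃ m, j = m + 1 := ⟨j - 1, by omega⟩
  rw [hB]
  simp only [List.getD_cons_succ, Nat.add_sub_cancel]
  exact alignGo_getD step xs a a m (by omega)

-- ===== VERDICT (by name: the statement is the Claim_ definition above) =====
theorem align_timestamps_py_spec : Claim_equal_align_timestamps_py := by
  intro raw step _ _
  unfold Spec_align_timestamps_py
  cases raw with
  | nil => rfl
  | cons a xs =>
    obtain ⟨hAl, hA0, hArec⟩ := A_char step a xs
    obtain ⟨hBl, hB0, hBrec⟩ := B_char step a xs
    have key : ∀ j : Nat, j < xs.length + 1 →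
        (align_timestamps_py (a :: xs) step).getD j 0 =
          (align_timestamps_py_alt (a :: xs) step).getD j 0 := by
      intro j
      induction j using Nat.strong_induction_on with
      | _ j ih =>
        intro hj
        match j with
        | 0 => rw [hA0, hB0]
        | Nat.succ m =>
          rw [hArec (m + 1) (by omega) hj, hBrec (m + 1) (by omega) hj]
          simp only [Nat.add_sub_cancel]
          rw [ih m (by omega) (by omega)]
    apply List.ext_getElem (by rw [hAl, hBl])
    intro i hi1 hi2
    have := key i (by omega)
    rwa [List.getD_eq_getElem _ _ hi1, List.getD_eq_getElem _ _ hi2] at this
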